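-- pv_equiv track=rewrite | github.com/lsst-ts/ts_love_csc | python/lsst/ts/love/csc/utils.py | parse_auth_request
-- ===== SOURCE A (Python) =====
-- def parse_auth_request(request):
--     """Parse input request string.
--
--     Returns
--     -------
--     to_add : `set`
--         Requests to add.
--     to_remove : `set`
--         Request to remove.
--     """
--
--     if len(request) == 0:
--         return set(), set()
--
--     request_as_set = set(request.split(","))
--
--     to_add = {item[1:] for item in request_as_set if item.startswith("+")}
--
--     to_remove = {item[1:] for item in request_as_set if item.startswith("-")}
--
--     union = to_add.union(to_remove)
--     if len(union) != len(request_as_set):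
--
--         bad_entries = {
--             item
--             for item in request_as_set
--             if not item.startswith("+") and not item.startswith("-")
--         }
--
--         raise RuntimeError(
--             f"Bad input parameter: {request}. "
--             "Requests must be preceded by a + or - sign to indicate the intention to "
--             "add or remove them from the auth list. "
--             f"The following entries are invalid: {bad_entries}."
--         )
--
--     return to_add, to_remove
-- ===== SOURCE B (Python) =====
-- def parse_auth_request(request):
--     """Parse input request string.
--
--     Single pass over the comma-separated items, sorting each into
--     to_add / to_remove / bad by its sign prefix; error checked directly
--     via the bad set and the add/remove intersection.
--     """
--     if len(request) == 0:
--         return set(), set()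
--
--     to_add = set()
--     to_remove = set()
--     bad = set()
--     for item in request.split(","):
--         if item.startswith("+"):
--             to_add.add(item[1:])
--         elif item.startswith("-"):
--             to_remove.add(item[1:])
--         else:
--             bad.add(item)
--
--     if bad or (to_add & to_remove):
--         raise RuntimeError(
--             f"Bad input parameter: {request}. "
--             "Requests must be preceded by a + or - sign to indicate the intention to "
--             "add or remove them from the auth list. "
--             f"The following entries are invalid: {bad}."
--         )
--
--     return to_add, to_remove
-- ===== Notes on version B (the rewrite author's own statement) =====
-- stated objective: simpler
-- what changed: B replaces A's dedup-into-a-set plus three separate set comprehensions and a cardinality comparison (len(union) != len(set)) by one direct pass over request.split(',') that sorts each item into to_add/to_remove/bad by its sign, and detects the error directly as 'bad or (to_add & to_remove)'; Pre_ excludes exactly the inputs where both raise RuntimeError.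
import Mathlib
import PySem

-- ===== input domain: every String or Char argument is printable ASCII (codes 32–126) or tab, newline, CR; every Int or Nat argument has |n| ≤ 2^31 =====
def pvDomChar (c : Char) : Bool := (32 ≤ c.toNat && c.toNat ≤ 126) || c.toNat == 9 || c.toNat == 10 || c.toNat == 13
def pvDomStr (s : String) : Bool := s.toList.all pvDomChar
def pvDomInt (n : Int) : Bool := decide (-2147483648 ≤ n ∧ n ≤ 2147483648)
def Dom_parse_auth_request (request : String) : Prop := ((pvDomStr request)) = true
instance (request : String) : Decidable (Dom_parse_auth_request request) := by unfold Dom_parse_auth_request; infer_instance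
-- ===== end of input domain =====

-- B restructures A: one direct pass over the split items sorting each into add/remove/bad,
-- with the error found as 'bad or (to_add & to_remove)' instead of A's cardinality comparison.
-- Pre_ excludes exactly the inputs on which both Pythons raise RuntimeError.

-- ===== PORT A =====
def parse_auth_request (request : String) : List String × List String :=
  if PySem.Str.len request = 0 then ([], [])
  else
    let request_as_set : PySem.Set String :=
      PySem.Set.ofList ((PySem.Str.split? request ",").getD [])
    let to_add : PySem.Set String :=
      PySem.Set.ofList
        ((request_as_set.filter (fun item => PySem.Str.startswith item "+")).map
          (fun item => PySem.Str.slice item (some 1) none))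
    let to_remove : PySem.Set String :=
      PySem.Set.ofList
        ((request_as_set.filter (fun item => PySem.Str.startswith item "-")).map
          (fun item => PySem.Str.slice item (some 1) none))
    let union := PySem.Set.union to_add to_remove
    if PySem.Set.len union ≠ PySem.Set.len request_as_set then
      ([], [])  -- Python raises RuntimeError here; excluded by Pre_
    else (to_add, to_remove)

-- ===== PORT B =====
-- one loop iteration of B: sort `item` into (to_add, to_remove, bad) by its sign prefix
def pvStepB (acc : List String × List String × List String) (item : String) :
    List String × List String × List String :=
  if PySem.Str.startswith item "+" then
    (PySem.Set.add acc.1 (PySem.Str.slice item (some 1) none), acc.2.1, acc.2.2)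
  else if PySem.Str.startswith item "-" then
    (acc.1, PySem.Set.add acc.2.1 (PySem.Str.slice item (some 1) none), acc.2.2)
  else
    (acc.1, acc.2.1, PySem.Set.add acc.2.2 item)

def parse_auth_request_alt (request : String) : List String × List String :=
  if PySem.Str.len request = 0 then ([], [])
  else
    let acc := ((PySem.Str.split? request ",").getD []).foldl pvStepB ([], [], [])
    if !acc.2.2.isEmpty || !(PySem.Set.inter acc.1 acc.2.1).isEmpty then
      ([], [])  -- Python raises RuntimeError here; excluded by Pre_
    else (acc.1, acc.2.1)

-- ===== PRECONDITION & SPEC =====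
-- Pre_ excludes exactly the nonempty requests on which A (and B) raise RuntimeError:
-- those with an item not prefixed by '+'/'-', or the same name appearing with both signs.
def Pre_parse_auth_request (request : String) : Prop :=
  request = "" ∨
    ((∀ item ∈ (PySem.Str.split? request ",").getD [],
        PySem.Str.startswith item "+" = true ∨ PySem.Str.startswith item "-" = true) ∧
     (∀ x ∈ (PySem.Str.split? request ",").getD [],
      ∀ y ∈ (PySem.Str.split? request ",").getD [],
        PySem.Str.startswith x "+" = true → PySem.Str.startswith y "-" = true →
        PySem.Str.slice x (some 1) none ≠ PySem.Str.slice y (some 1) none))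
instance (request : String) : Decidable (Pre_parse_auth_request request) := by
  unfold Pre_parse_auth_request; infer_instance

def pvWitness_parse_auth_request : String := "+alice,-bob,+carol"

def Spec_parse_auth_request (request : String) (out : List String × List String) : Prop :=
  out = parse_auth_request_alt request
instance (request : String) (out : List String × List String) :
    Decidable (Spec_parse_auth_request request out) := by
  unfold Spec_parse_auth_request; infer_instance

-- ===== CLAIM (what is proved, stated in full; the proofs are below) =====
def Claim_equal_parse_auth_request : Prop :=
  ∀ (request : String), Dom_parse_auth_request request → Pre_parse_auth_request request →
    Spec_parse_auth_request request (parse_auth_request request)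

-- ===== LEMMAS AND PROOFS =====

-- a string starting with the one-char string s has toList = c :: tail
lemma pv_startswith_toList (x : String) (s : String) (c : Char) (hs : s.toList = [c])
    (h : PySem.Str.startswith x s = true) : x.toList = c :: x.toList.tail := by
  rw [PySem.Str.startswith_eq, hs] at h
  obtain ⟨t, ht⟩ := (PySem.Chars.startswith_iff x.toList [c]).mp h
  simp [← ht]

-- '+'- and '-'-prefixed items are mutually exclusive
lemma pv_plus_ne_minus (x : String) (hp : PySem.Str.startswith x "+" = true)
    (hq : PySem.Str.startswith x "-" = true) : False := by
  have h1 := pv_startswith_toList x "+" '+' (by decide) hp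
  have h2 := pv_startswith_toList x "-" '-' (by decide) hq
  rw [h1] at h2
  simp at h2

-- item[1:] as a character list is the tail
lemma pv_slice_toList (x : String) :
    (PySem.Str.slice x (some 1) none).toList = x.toList.tail := by
  simp [PySem.Str.toList_slice, PySem.List.slice_from_one]

-- item ↦ item[1:] is injective on strings sharing the same sign prefix
lemma pv_tail_inj (x y : String) (s : String) (c : Char) (hs : s.toList = [c])
    (hx : PySem.Str.startswith x s = true) (hy : PySem.Str.startswith y s = true)
    (hf : PySem.Str.slice x (some 1) none = PySem.Str.slice y (some 1) none) : x = y := by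
  have h1 := pv_startswith_toList x s c hs hx
  have h2 := pv_startswith_toList y s c hs hy
  have h3 : x.toList.tail = y.toList.tail := by
    have h := congrArg String.toList hf
    rw [pv_slice_toList, pv_slice_toList] at h
    exact h
  apply String.toList_inj.mp
  rw [h1, h2, h3]

-- ofList grows by Set.add on the right
lemma pv_ofList_append (l : List String) (x : String) :
    PySem.Set.ofList (l ++ [x]) = PySem.Set.add (PySem.Set.ofList l) x := by
  simp [PySem.Set.ofList_eq_foldl, List.foldl_append]

lemma pv_add_of_mem (s : PySem.Set String) (x : String) (h : x ∈ s) :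
    PySem.Set.add s x = s := by
  simp [PySem.Set.add, PySem.Set.contains_eq_listContains]
  exact h

lemma pv_add_of_not_mem (s : PySem.Set String) (x : String) (h : x ∉ s) :
    PySem.Set.add s x = s ++ [x] := by
  simp [PySem.Set.add, PySem.Set.contains_eq_listContains]
  exact h

-- filter commutes with set-building (keep-first dedup)
lemma pv_filter_ofList (P : String → Bool) (l : List String) :
    (PySem.Set.ofList l).filter P = PySem.Set.ofList (l.filter P) := by
  induction l using List.reverseRecOn with
  | nil => rfl
  | append_singleton l x ih =>
    rw [pv_ofList_append]
    by_cases hp : P x = true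
    · have hr : (l ++ [x]).filter P = l.filter P ++ [x] := by simp [hp]
      rw [hr, pv_ofList_append]
      by_cases hx : x ∈ l
      · rw [pv_add_of_mem _ _ (by rw [PySem.Set.mem_ofList]; exact hx)]
        rw [pv_add_of_mem _ _ (by rw [PySem.Set.mem_ofList]; exact List.mem_filter.mpr ⟨hx, hp⟩)]
        exact ih
      · rw [pv_add_of_not_mem _ _ (by rw [PySem.Set.mem_ofList]; exact hx)]
        rw [pv_add_of_not_mem _ _ (by
          rw [PySem.Set.mem_ofList]
          intro hc
          exact hx (List.mem_filter.mp hc).1)]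
        rw [List.filter_append, ih]
        simp [hp]
    · have hp' : P x = false := by simpa using hp
      have hr : (l ++ [x]).filter P = l.filter P := by simp [hp']
      rw [hr]
      by_cases hx : x ∈ l
      · rw [pv_add_of_mem _ _ (by rw [PySem.Set.mem_ofList]; exact hx)]
        exact ih
      · rw [pv_add_of_not_mem _ _ (by rw [PySem.Set.mem_ofList]; exact hx)]
        rw [List.filter_append, ih]
        simp [hp']

-- map commutes with set-building when f is injective on the listed elements
lemma pv_map_ofList (f : String → String) (P : String → Bool) (l : List String)
    (hl : ∀ x ∈ l, P x = true)
    (hinj : ∀ x y, P x = true → P y = true → f x = f y → x = y) :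
    (PySem.Set.ofList l).map f = PySem.Set.ofList (l.map f) := by
  induction l using List.reverseRecOn with
  | nil => rfl
  | append_singleton l x ih =>
    have hl' : ∀ y ∈ l, P y = true := fun y hy => hl y (by simp [hy])
    have hx : P x = true := hl x (by simp)
    rw [pv_ofList_append]
    have hr : (l ++ [x]).map f = l.map f ++ [f x] := by simp
    rw [hr, pv_ofList_append]
    by_cases hm : x ∈ l
    · rw [pv_add_of_mem _ _ (by rw [PySem.Set.mem_ofList]; exact hm)]
      rw [pv_add_of_mem _ _ (by rw [PySem.Set.mem_ofList]; exact List.mem_map.mpr ⟨x, hm, rfl⟩)]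
      exact ih hl'
    · rw [pv_add_of_not_mem _ _ (by rw [PySem.Set.mem_ofList]; exact hm)]
      have hfm : f x ∉ l.map f := by
        intro hc
        obtain ⟨y, hy, hfy⟩ := List.mem_map.mp hc
        exact hm (hinj y x (hl' y hy) hx hfy ▸ hy)
      rw [pv_add_of_not_mem _ _ (by rw [PySem.Set.mem_ofList]; exact hfm)]
      rw [List.map_append, ih hl']
      simp

-- A's set comprehension over the deduplicated set equals B's over the raw list
lemma pv_comprehension (f : String → String) (P : String → Bool) (l : List String)
    (hinj : ∀ x y, P x = true → P y = true → f x = f y → x = y) :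
    PySem.Set.ofList (((PySem.Set.ofList l).filter P).map f)
      = PySem.Set.ofList ((l.filter P).map f) := by
  rw [pv_filter_ofList]
  rw [pv_map_ofList f P (l.filter P) (fun x hx => (List.mem_filter.mp hx).2) hinj]
  exact PySem.Set.ofList_ofList _

lemma pv_update_cons (s : PySem.Set String) (y : String) (ys : List String) :
    PySem.Set.update s (y :: ys) = PySem.Set.update (PySem.Set.add s y) ys := rfl

-- B's fold computes the three sets of the three filtered projections
lemma pv_foldB (l : List String) (a r b : List String) :
    l.foldl pvStepB (a, r, b) =
      (PySem.Set.update a ((l.filter (fun x => PySem.Str.startswith x "+")).map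
          (fun x => PySem.Str.slice x (some 1) none)),
       PySem.Set.update r ((l.filter (fun x =>
            !PySem.Str.startswith x "+" && PySem.Str.startswith x "-")).map
          (fun x => PySem.Str.slice x (some 1) none)),
       PySem.Set.update b (l.filter (fun x =>
            !PySem.Str.startswith x "+" && !PySem.Str.startswith x "-"))) := by
  induction l generalizing a r b with
  | nil => rfl
  | cons x l ih =>
    rw [List.foldl_cons]
    by_cases hp : PySem.Str.startswith x "+" = true
    · have hpc : PySem.Chars.startswith x.toList ['+'] = true := by simpa using hp
      have hstep : pvStepB (a, r, b) x
          = (PySem.Set.add a (PySem.Str.slice x (some 1) none), r, b) := by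
        unfold pvStepB
        rw [if_pos hp]
      rw [hstep, ih]
      have h1 : (x :: l).filter (fun x => PySem.Str.startswith x "+")
          = x :: l.filter (fun x => PySem.Str.startswith x "+") := by
        rw [List.filter_cons]; simp [hpc]
      have h2 : (x :: l).filter (fun x =>
            !PySem.Str.startswith x "+" && PySem.Str.startswith x "-")
          = l.filter (fun x => !PySem.Str.startswith x "+" && PySem.Str.startswith x "-") := by
        rw [List.filter_cons]; simp [hpc]
      have h3 : (x :: l).filter (fun x =>
            !PySem.Str.startswith x "+" && !PySem.Str.startswith x "-")
          = l.filter (fun x => !PySem.Str.startswith x "+" && !PySem.Str.startswith x "-") := by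
        rw [List.filter_cons]; simp [hpc]
      rw [h1, h2, h3, List.map_cons, pv_update_cons]
    · have hp' : PySem.Str.startswith x "+" = false := by simpa using hp
      have hpc : PySem.Chars.startswith x.toList ['+'] = false := by simpa using hp'
      by_cases hq : PySem.Str.startswith x "-" = true
      · have hqc : PySem.Chars.startswith x.toList ['-'] = true := by simpa using hq
        have hstep : pvStepB (a, r, b) x
            = (a, PySem.Set.add r (PySem.Str.slice x (some 1) none), b) := by
          unfold pvStepB
          rw [if_neg (by rw [hp']; simp), if_pos hq]
        rw [hstep, ih]
        have h1 : (x :: l).filter (fun x => PySem.Str.startswith x "+")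
            = l.filter (fun x => PySem.Str.startswith x "+") := by
          rw [List.filter_cons]; simp [hpc]
        have h2 : (x :: l).filter (fun x =>
              !PySem.Str.startswith x "+" && PySem.Str.startswith x "-")
            = x :: l.filter (fun x =>
              !PySem.Str.startswith x "+" && PySem.Str.startswith x "-") := by
          rw [List.filter_cons]; simp [hpc, hqc]
        have h3 : (x :: l).filter (fun x =>
              !PySem.Str.startswith x "+" && !PySem.Str.startswith x "-")
            = l.filter (fun x => !PySem.Str.startswith x "+" && !PySem.Str.startswith x "-") := by
          rw [List.filter_cons]; simp [hqc]
        rw [h1, h2, h3, List.map_cons, pv_update_cons]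
      · have hq' : PySem.Str.startswith x "-" = false := by simpa using hq
        have hqc : PySem.Chars.startswith x.toList ['-'] = false := by simpa using hq'
        have hstep : pvStepB (a, r, b) x = (a, r, PySem.Set.add b x) := by
          unfold pvStepB
          rw [if_neg (by rw [hp']; simp), if_neg (by rw [hq']; simp)]
        rw [hstep, ih]
        have h1 : (x :: l).filter (fun x => PySem.Str.startswith x "+")
            = l.filter (fun x => PySem.Str.startswith x "+") := by
          rw [List.filter_cons]; simp [hpc]
        have h2 : (x :: l).filter (fun x =>
              !PySem.Str.startswith x "+" && PySem.Str.startswith x "-")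
            = l.filter (fun x => !PySem.Str.startswith x "+" && PySem.Str.startswith x "-") := by
          rw [List.filter_cons]; simp [hqc]
        have h3 : (x :: l).filter (fun x =>
              !PySem.Str.startswith x "+" && !PySem.Str.startswith x "-")
            = x :: l.filter (fun x =>
              !PySem.Str.startswith x "+" && !PySem.Str.startswith x "-") := by
          rw [List.filter_cons]; simp [hpc, hqc]
        rw [h1, h2, h3, pv_update_cons]

-- updating a set with disjoint fresh nodup elements is concatenation
lemma pv_update_disjoint (t s : List String) (hs : s.Nodup) (ht : t.Nodup)
    (hd : ∀ x ∈ t, x ∉ s) : PySem.Set.update s t = s ++ t := by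
  induction t generalizing s with
  | nil => simp [PySem.Set.update]
  | cons y t ih =>
    have hy : y ∉ s := hd y (by simp)
    have hns : (s ++ [y]).Nodup :=
      hs.append (List.nodup_singleton y)
        (fun a ha hb => hy (by rwa [List.mem_singleton.mp hb] at ha))
    rw [pv_update_cons, pv_add_of_not_mem _ _ hy]
    rw [ih (s ++ [y]) hns ht.of_cons]
    · simp
    · intro x hx
      simp only [List.mem_append, List.mem_singleton]
      rintro (h | rfl)
      · exact hd x (by simp [hx]) h
      · exact (List.nodup_cons.mp ht).1 hx

theorem parse_auth_request_spec : Claim_equal_parse_auth_request := by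
  intro request _hdom hpre
  unfold Spec_parse_auth_request
  simp only [parse_auth_request, parse_auth_request_alt]
  by_cases hlen : PySem.Str.len request = 0
  · rw [if_pos hlen, if_pos hlen]
  · rw [if_neg hlen, if_neg hlen]
    have hne : request ≠ "" := fun h => hlen (by rw [h]; rfl)
    rcases hpre with h | ⟨H1, H2⟩
    · exact absurd h hne
    -- abbreviate the split list
    generalize hL : (PySem.Str.split? request ",").getD [] = l at *
    -- injectivity of item[1:] on each sign class
    have hinjP : ∀ x y, PySem.Str.startswith x "+" = true → PySem.Str.startswith y "+" = true →
        PySem.Str.slice x (some 1) none = PySem.Str.slice y (some 1) none → x = y :=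
      fun x y hx hy => pv_tail_inj x y "+" '+' (by decide) hx hy
    have hinjQ : ∀ x y, PySem.Str.startswith x "-" = true → PySem.Str.startswith y "-" = true →
        PySem.Str.slice x (some 1) none = PySem.Str.slice y (some 1) none → x = y :=
      fun x y hx hy => pv_tail_inj x y "-" '-' (by decide) hx hy
    -- B's three accumulated sets
    rw [pv_foldB]
    simp only [PySem.Set.update_nil_left]
    have hfq : l.filter (fun x => !PySem.Str.startswith x "+" && PySem.Str.startswith x "-")
        = l.filter (fun x => PySem.Str.startswith x "-") := by
      apply List.filter_congr
      intro x _
      show (!PySem.Str.startswith x "+" && PySem.Str.startswith x "-")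
          = PySem.Str.startswith x "-"
      cases hqx : PySem.Str.startswith x "-" with
      | false => rw [Bool.and_false]
      | true =>
        have hpx : PySem.Str.startswith x "+" = false := by
          cases hpx : PySem.Str.startswith x "+" with
          | false => rfl
          | true => exact (pv_plus_ne_minus x hpx hqx).elim
        rw [hpx]
        rfl
    have hfn : l.filter (fun x => !PySem.Str.startswith x "+" && !PySem.Str.startswith x "-")
        = [] := by
      rw [List.filter_eq_nil_iff]
      intro x hx
      intro hc
      rcases H1 x hx with h | h
      · rw [h] at hc
        simp at hc
      · rw [h] at hc
        simp at hc
    rw [hfq, hfn]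
    -- the bad set is empty and the add/remove intersection is empty
    have hinter : PySem.Set.inter
        (PySem.Set.ofList ((l.filter (fun x => PySem.Str.startswith x "+")).map
          (fun x => PySem.Str.slice x (some 1) none)))
        (PySem.Set.ofList ((l.filter (fun x => PySem.Str.startswith x "-")).map
          (fun x => PySem.Str.slice x (some 1) none))) = [] := by
      rw [List.eq_nil_iff_forall_not_mem]
      intro z hz
      rw [PySem.Set.mem_inter] at hz
      obtain ⟨hz1, hz2⟩ := hz
      rw [PySem.Set.mem_ofList] at hz1 hz2
      obtain ⟨x, hxl, hxz⟩ := List.mem_map.mp hz1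
      obtain ⟨y, hyl, hyz⟩ := List.mem_map.mp hz2
      rw [List.mem_filter] at hxl hyl
      exact H2 x hxl.1 y hyl.1 hxl.2 hyl.2 (hxz.trans hyz.symm)
    -- A's comprehensions over the deduplicated set equal B's over the raw list
    have hA := pv_comprehension (fun x => PySem.Str.slice x (some 1) none)
      (fun x => PySem.Str.startswith x "+") l hinjP
    have hR := pv_comprehension (fun x => PySem.Str.slice x (some 1) none)
      (fun x => PySem.Str.startswith x "-") l hinjQ
    -- A does not raise: the union has exactly as many elements as the item set
    have hSnodup : (PySem.Set.ofList l).Nodup := PySem.Set.nodup_ofList l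
    have hMA : (((PySem.Set.ofList l).filter (fun x => PySem.Str.startswith x "+")).map
        (fun x => PySem.Str.slice x (some 1) none)).Nodup := by
      apply List.Nodup.map_on _ (hSnodup.filter _)
      intro x hx y hy
      rw [List.mem_filter] at hx hy
      exact fun h => hinjP x y hx.2 hy.2 h
    have hMR : (((PySem.Set.ofList l).filter (fun x => PySem.Str.startswith x "-")).map
        (fun x => PySem.Str.slice x (some 1) none)).Nodup := by
      apply List.Nodup.map_on _ (hSnodup.filter _)
      intro x hx y hy
      rw [List.mem_filter] at hx hy
      exact fun h => hinjQ x y hx.2 hy.2 h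
    have hdisj : ∀ z ∈ ((PySem.Set.ofList l).filter (fun x => PySem.Str.startswith x "-")).map
          (fun x => PySem.Str.slice x (some 1) none),
        z ∉ ((PySem.Set.ofList l).filter (fun x => PySem.Str.startswith x "+")).map
          (fun x => PySem.Str.slice x (some 1) none) := by
      intro z hz hz'
      obtain ⟨y, hyl, hyz⟩ := List.mem_map.mp hz
      obtain ⟨x, hxl, hxz⟩ := List.mem_map.mp hz'
      rw [List.mem_filter, PySem.Set.mem_ofList] at hxl hyl
      exact H2 x hxl.1 y hyl.1 hxl.2 hyl.2 (hxz.trans hyz.symm)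
    have hqnotp : (PySem.Set.ofList l).filter (fun x => PySem.Str.startswith x "-")
        = (PySem.Set.ofList l).filter (fun x => !PySem.Str.startswith x "+") := by
      apply List.filter_congr
      intro x hx
      rw [PySem.Set.mem_ofList] at hx
      show PySem.Str.startswith x "-" = !PySem.Str.startswith x "+"
      rcases H1 x hx with h | h
      · have hqx : PySem.Str.startswith x "-" = false := by
          cases hqx : PySem.Str.startswith x "-" with
          | false => rfl
          | true => exact (pv_plus_ne_minus x h hqx).elim
        rw [hqx, h]
        rfl
      · have hpx : PySem.Str.startswith x "+" = false := by
          cases hpx : PySem.Str.startswith x "+" with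
          | false => rfl
          | true => exact (pv_plus_ne_minus x hpx h).elim
        rw [h, hpx]
        rfl
    have hAeq := PySem.Set.ofList_eq_self_of_nodup _ hMA
    have hReq := PySem.Set.ofList_eq_self_of_nodup _ hMR
    have hlens : PySem.Set.len (PySem.Set.union
          (PySem.Set.ofList (((PySem.Set.ofList l).filter
              (fun x => PySem.Str.startswith x "+")).map
            (fun x => PySem.Str.slice x (some 1) none)))
          (PySem.Set.ofList (((PySem.Set.ofList l).filter
              (fun x => PySem.Str.startswith x "-")).map
            (fun x => PySem.Str.slice x (some 1) none))))
        = PySem.Set.len (PySem.Set.ofList l) := by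
      have hu : PySem.Set.union
            (PySem.Set.ofList (((PySem.Set.ofList l).filter
                (fun x => PySem.Str.startswith x "+")).map
              (fun x => PySem.Str.slice x (some 1) none)))
            (PySem.Set.ofList (((PySem.Set.ofList l).filter
                (fun x => PySem.Str.startswith x "-")).map
              (fun x => PySem.Str.slice x (some 1) none)))
          = ((PySem.Set.ofList l).filter (fun x => PySem.Str.startswith x "+")).map
              (fun x => PySem.Str.slice x (some 1) none)
            ++ ((PySem.Set.ofList l).filter (fun x => PySem.Str.startswith x "-")).map
              (fun x => PySem.Str.slice x (some 1) none) := by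
        rw [hAeq, hReq]
        exact pv_update_disjoint _ _ hMA hMR hdisj
      rw [hu]
      have hlen2 : (((PySem.Set.ofList l).filter (fun x => PySem.Str.startswith x "+")).map
              (fun x => PySem.Str.slice x (some 1) none)
            ++ ((PySem.Set.ofList l).filter (fun x => PySem.Str.startswith x "-")).map
              (fun x => PySem.Str.slice x (some 1) none)).length
          = (PySem.Set.ofList l).length := by
        rw [List.length_append, List.length_map, List.length_map, hqnotp]
        exact (List.length_eq_length_filter_add (fun x => PySem.Str.startswith x "+")).symm
      simp only [PySem.Set.len]
      exact_mod_cast hlen2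
    rw [hlens]
    rw [if_neg (not_not_intro rfl)]
    rw [hA, hR, hinter]
    simp
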